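-- pv_equiv track=rewrite | github.com/bmykhaylivvv/skyscrapers | skyscrapers.py | check_horizontal_visibility
-- ===== SOURCE A (Python) =====
-- def check_horizontal_visibility(board: list):
--     """
--     Check row-wise visibility (left-right and vice versa)
--
--     Return True if all horizontal hints are satisfiable,
--      i.e., for line 412453* , hint is 4, and 1245 are the four buildings
--       that could be observed from the hint looking to the right.
--
--     >>> check_horizontal_visibility(['***21**', '412453*', '423145*', '*543215', '*35214*', '*41532*', '*2*1***'])
--     True
--     >>> check_horizontal_visibility(['***21**', '452453*', '423145*', '*543215', '*35214*', '*41532*', '*2*1***'])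
--     False
--     >>> check_horizontal_visibility(['***21**', '452413*', '423145*', '*543215', '*35214*', '*41532*', '*2*1***'])
--     False
--     """
--     def horizontal_visibility(line):
--         if line[0] != '*':
--             pivot = int(line[0])
--             counter = 1
--             highest = line[1]
--             for i in range(2, len(line[1:-1]) + 1):
--                 if line[i] > highest:
--                     counter += 1
--                     highest = line[i]
--
--             if counter == pivot:
--                 return True
--             return False
--         pass
--
--     board = board + [line[::-1] for line in board]
--
--     tf = []
--     for ln in board:
--         res = horizontal_visibility(ln)
--         if res is not None:
--             tf.append(res)
--
--     return all(tf)
-- ===== SOURCE B (Python) =====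
-- def check_horizontal_visibility(board: list):
--     """Check each row's two hints directly (no doubled board, no result list of
--     per-line outcomes).  A building is visible from a hint iff it is strictly
--     taller than every building standing before it on the way from that hint, so
--     the visible count is obtained by pairwise comparisons instead of a running
--     maximum: the building next to the hint (line[1]) plus the rest of the
--     interior (line[2:-1])."""
--     def hint_ok(line):
--         if line[0] == '*':
--             return True
--         s = line[1] + line[2:-1]
--         visible = sum(all(s[j] < s[i] for j in range(i)) for i in range(len(s)))
--         return int(line[0]) == visible
--
--     return all(hint_ok(row) and hint_ok(row[::-1]) for row in board)
-- ===== Notes on version B (the rewrite author's own statement) =====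
-- stated objective: alternative
-- what changed: B drops A's doubled board, Option-returning helper and collected result list, and replaces the running-maximum counter by a declarative visibility criterion checked per row in both directions: a building is visible iff it is strictly taller than every building before it, counted by pairwise comparisons.
import Mathlib
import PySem

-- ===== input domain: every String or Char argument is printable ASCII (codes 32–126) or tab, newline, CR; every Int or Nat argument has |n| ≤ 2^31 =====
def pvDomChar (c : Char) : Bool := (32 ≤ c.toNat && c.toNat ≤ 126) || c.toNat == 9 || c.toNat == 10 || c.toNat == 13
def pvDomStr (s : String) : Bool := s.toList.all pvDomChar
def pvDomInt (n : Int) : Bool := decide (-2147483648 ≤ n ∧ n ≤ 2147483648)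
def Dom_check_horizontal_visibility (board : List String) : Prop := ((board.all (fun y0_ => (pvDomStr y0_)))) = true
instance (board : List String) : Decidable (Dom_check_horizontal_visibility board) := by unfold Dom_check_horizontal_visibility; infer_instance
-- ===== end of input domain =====

-- B drops A's doubled board, Option helper and result list, and replaces the running-maximum
-- counter by a per-row pairwise-comparison visibility criterion (objective: alternative).

-- ===== PORT A =====
-- port of the inner helper horizontal_visibility; none = Python None, and also marks
-- the inputs where the Python raises (IndexError/ValueError), which Pre_ excludes
def pvHoriz (line : List Char) : Option Bool :=
  match PySem.List.pyGet? line 0 with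
  | none => none  -- line[0] IndexError (excluded by Pre_)
  | some c0 =>
    if c0 ≠ '*' then
      -- int(line[0]); Pre_ guarantees a digit so ofChars? is some; default never read inside Pre_
      let pivot : Int := (PySem.Int.ofChars? [c0]).getD 0
      match PySem.List.pyGet? line 1 with
      | none => none  -- line[1] IndexError (excluded by Pre_)
      | some h1 =>
        let st := (PySem.List.pyRange 2 (((PySem.List.slice line (some 1) (some (-1))).length : Int) + 1)).foldl
          (fun (s : Int × Char) i =>
            -- 'if line[i] > highest: counter += 1; highest = line[i]'; index always in range here
            if PySem.List.pyGetD line i ' ' > s.2 then (s.1 + 1, PySem.List.pyGetD line i ' ') else s) ((1 : Int), h1)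
        some (decide (st.1 = pivot))
    else none

def check_horizontal_visibility (board : List String) : Bool :=
  let board2 := board ++ board.map (fun l => (PySem.Str.slice? l none none (-1)).getD "")
  let tf := board2.foldl (fun (acc : List Bool) ln =>
      match pvHoriz ln.toList with
      | some r => acc ++ [r]
      | none => acc) []
  tf.all (fun b => b)

-- ===== PORT B =====
-- 'sum(all(s[j] < s[i] for j in range(i)) for i in range(len(s)))'; every index drawn
-- from range is nonnegative and in range, so List.getD is exact for s[i]
def pvVisCount (s : List Char) : Int :=
  ((List.range s.length).map (fun i =>
    if (List.range i).all (fun j => decide (s.getD j ' ' < s.getD i ' ')) then (1 : Int) else 0)).sum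

-- Source B's hint_ok; true on the empty/one-char lines where Source B raises (outside Pre_)
def pvHintOk (line : List Char) : Bool :=
  match line with
  | [] => true
  | c0 :: rest =>
    if c0 = '*' then true
    else match rest with
      | [] => true
      | h1 :: _t =>
        decide ((PySem.Int.ofChars? [c0]).getD 0
          = pvVisCount (h1 :: PySem.List.slice line (some 2) (some (-1))))

def check_horizontal_visibility_alt (board : List String) : Bool :=
  board.all (fun row =>
    pvHintOk row.toList && pvHintOk ((PySem.Str.slice? row none none (-1)).getD "").toList)

-- ===== PRECONDITION & SPEC =====
-- Pre_ excludes exactly the inputs where A raises: a row that is empty (IndexError), or whose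
-- first/last character is neither '*' nor a digit (ValueError from int), or a one-character
-- row with a non-'*' character (IndexError on line[1]).
def pvLineOK (cs : List Char) : Bool :=
  match cs with
  | [] => false
  | c :: t => c == '*' || (c.isDigit && !t.isEmpty)

def Pre_check_horizontal_visibility (board : List String) : Prop :=
  ∀ s ∈ board, pvLineOK s.toList = true ∧ pvLineOK s.toList.reverse = true

instance (board : List String) : Decidable (Pre_check_horizontal_visibility board) := by
  unfold Pre_check_horizontal_visibility; infer_instance

def pvWitness_check_horizontal_visibility : List String :=
  ["***21**", "412453*", "423145*", "*543215", "*35214*", "*41532*", "*2*1***"]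

def Spec_check_horizontal_visibility (board : List String) (out : Bool) : Prop := out = check_horizontal_visibility_alt board
instance (board : List String) (out : Bool) : Decidable (Spec_check_horizontal_visibility board out) := by unfold Spec_check_horizontal_visibility; infer_instance

-- ===== CLAIM (what is proved, stated in full; the proofs are below) =====
def Claim_equal_check_horizontal_visibility : Prop := ∀ (board : List String), Dom_check_horizontal_visibility board → Pre_check_horizontal_visibility board → Spec_check_horizontal_visibility board (check_horizontal_visibility board)

-- ===== LEMMAS AND PROOFS =====

-- the running maximum maintained by A's loop, as a fold
def pvMaxC (p : List Char) (h : Char) : Char := p.foldl (fun h c => if c > h then c else h) h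

lemma pv_all_congr_mem {α : Type} (L : List α) (p q : α → Bool)
    (h : ∀ x ∈ L, p x = q x) : L.all p = L.all q := by
  induction L with
  | nil => rfl
  | cons x xs ih =>
    simp only [List.all_cons]
    rw [h x (List.mem_cons_self), ih (fun y hy => h y (List.mem_cons_of_mem _ hy))]

lemma pv_maxC_append (p : List Char) (h c : Char) :
    pvMaxC (p ++ [c]) h = if c > pvMaxC p h then c else pvMaxC p h := by
  simp [pvMaxC]

-- 'everything so far is below c' = 'the running maximum is below c'
lemma pv_maxC_lt (p : List Char) (h c : Char) :
    ((h :: p).all (fun x => decide (x < c))) = decide (pvMaxC p h < c) := by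
  induction p generalizing h with
  | nil => simp [pvMaxC]
  | cons a t ih =>
    rw [show pvMaxC (a :: t) h = pvMaxC t (if a > h then a else h) from rfl, ← ih]
    simp only [List.all_cons, ← Bool.and_assoc]
    congr 1
    by_cases hah : a > h
    · rw [if_pos hah]
      by_cases hac : a < c
      · have hhc : h < c := lt_trans hah hac
        simp [hac, hhc]
      · by_cases hhc : h < c <;> simp [hac, hhc]
    · rw [if_neg hah]
      by_cases hhc : h < c
      · have hac : a < c := lt_of_le_of_lt (not_lt.mp hah) hhc
        simp [hac, hhc]
      · simp [hhc]

-- a list's 'all' stated over indices drawn from range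
lemma pv_all_range (s : List Char) (c : Char) :
    ((List.range s.length).all fun j => decide (s.getD j ' ' < c))
      = s.all (fun x => decide (x < c)) := by
  induction s with
  | nil => rfl
  | cons a t ih =>
    rw [List.length_cons, List.range_succ_eq_map, List.all_cons, List.all_cons]
    simp only [List.all_map, List.getD_cons_zero]
    congr 1

-- pvVisCount over a snoc: the new element adds 1 iff it beats the whole prefix
lemma pv_visCount_snoc (s : List Char) (c : Char) :
    pvVisCount (s ++ [c])
      = pvVisCount s + (if s.all (fun x => decide (x < c)) then 1 else 0) := by
  have hin : ∀ i ∈ List.range s.length,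
      (if (List.range i).all (fun j => decide ((s ++ [c]).getD j ' ' < (s ++ [c]).getD i ' ')) then (1 : Int) else 0)
        = (if (List.range i).all (fun j => decide (s.getD j ' ' < s.getD i ' ')) then (1 : Int) else 0) := by
    intro i hi
    have hi' : i < s.length := List.mem_range.mp hi
    have hgi : (s ++ [c]).getD i ' ' = s.getD i ' ' := by
      simp [List.getD, List.getElem?_append_left hi']
    rw [hgi, pv_all_congr_mem _ _ (fun j => decide (s.getD j ' ' < s.getD i ' '))
      (fun j hj => by
        have hj' : j < s.length := by have := List.mem_range.mp hj; omega
        simp [List.getD, List.getElem?_append_left hj'])]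
  have hgc : (s ++ [c]).getD s.length ' ' = c := by
    simp [List.getD]
  simp only [pvVisCount, List.length_append, List.length_cons, List.length_nil,
    List.range_succ, List.map_append, List.sum_append]
  congr 1
  · exact congrArg _ (List.map_congr_left hin)
  · simp only [List.map_cons, List.map_nil, List.sum_cons, List.sum_nil, add_zero, hgc]
    congr 1
    rw [pv_all_congr_mem _ _ (fun j => decide (s.getD j ' ' < c))
      (fun j hj => by
        have hj' : j < s.length := List.mem_range.mp hj
        simp [List.getD, List.getElem?_append_left hj']),
      pv_all_range]

lemma pv_brute_run (rest : List Char) : ∀ (first : Char) (taken : List Char),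
    (rest.foldl (fun (s : Int × Char) c => if c > s.2 then (s.1 + 1, c) else s)
      (pvVisCount (first :: taken), pvMaxC taken first)).1
      = pvVisCount ((first :: taken) ++ rest) := by
  induction rest with
  | nil => intro first taken; simp
  | cons c rest ih =>
    intro first taken
    simp only [List.foldl_cons]
    have hsnoc : pvVisCount ((first :: taken) ++ [c])
        = pvVisCount (first :: taken)
          + (if (first :: taken).all (fun x => decide (x < c)) then 1 else 0) :=
      pv_visCount_snoc (first :: taken) c
    have hmlt := pv_maxC_lt taken first c
    by_cases hc : c > pvMaxC taken first
    · have hall : (first :: taken).all (fun x => decide (x < c)) = true := by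
        rw [hmlt]; exact decide_eq_true hc
      have hst : ((pvVisCount (first :: taken) + 1, c) : Int × Char)
          = (pvVisCount (first :: (taken ++ [c])), pvMaxC (taken ++ [c]) first) := by
        rw [show pvVisCount (first :: (taken ++ [c]))
              = pvVisCount (first :: taken) + 1 from by
            rw [show first :: (taken ++ [c]) = (first :: taken) ++ [c] from rfl, hsnoc, hall]
            simp,
          show pvMaxC (taken ++ [c]) first = c from by rw [pv_maxC_append, if_pos hc]]
      rw [if_pos hc, hst, ih first (taken ++ [c])]
      simp
    · have hall : (first :: taken).all (fun x => decide (x < c)) = false := by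
        rw [hmlt]; exact decide_eq_false hc
      have hst : ((pvVisCount (first :: taken), pvMaxC taken first) : Int × Char)
          = (pvVisCount (first :: (taken ++ [c])), pvMaxC (taken ++ [c]) first) := by
        rw [show pvVisCount (first :: (taken ++ [c]))
              = pvVisCount (first :: taken) from by
            rw [show first :: (taken ++ [c]) = (first :: taken) ++ [c] from rfl, hsnoc, hall]
            simp,
          show pvMaxC (taken ++ [c]) first = pvMaxC taken first from by
            rw [pv_maxC_append, if_neg hc]]
      rw [if_neg hc, hst, ih first (taken ++ [c])]
      simp

-- A's running-maximum counter computes B's pairwise-comparison count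
lemma pv_run_eq_brute (first : Char) (rest : List Char) :
    (rest.foldl (fun (s : Int × Char) c => if c > s.2 then (s.1 + 1, c) else s)
      ((1 : Int), first)).1 = pvVisCount (first :: rest) := by
  have h0 : pvVisCount [first] = 1 := by simp [pvVisCount, List.range_succ]
  have := pv_brute_run rest first []
  rw [h0] at this
  simpa [pvMaxC] using this

-- A's result-collecting loop is a filterMap
lemma pv_tf_filterMap (L : List String) (acc : List Bool) :
    L.foldl (fun (acc : List Bool) ln =>
      match pvHoriz ln.toList with
      | some r => acc ++ [r]
      | none => acc) acc = acc ++ L.filterMap (fun ln => pvHoriz ln.toList) := by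
  induction L generalizing acc with
  | nil => simp
  | cons x xs ih =>
    simp only [List.foldl_cons, List.filterMap_cons]
    cases h : pvHoriz x.toList <;> simp [ih]

lemma pv_all_filterMap {α : Type} (L : List α) (f : α → Option Bool) :
    (L.filterMap f).all (fun b => b) = L.all (fun x => (f x).getD true) := by
  induction L with
  | nil => rfl
  | cons x xs ih => cases h : f x <;> simp [h, ih]

lemma pv_all_and {α : Type} (L : List α) (p q : α → Bool) :
    L.all (fun x => p x && q x) = (L.all p && L.all q) := by
  induction L with
  | nil => rfl
  | cons x xs ih =>
    simp only [List.all_cons, ih]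
    cases p x <;> cases q x <;> cases xs.all p <;> cases xs.all q <;> rfl

-- the per-line correspondence: where A's helper returns a Bool it is B's check,
-- where it returns None (a '*' hint) B's check is trivially true
lemma pv_horiz_getD (cs : List Char) (h : pvLineOK cs = true) :
    (pvHoriz cs).getD true = pvHintOk cs := by
  cases cs with
  | nil => exact absurd h (by simp [pvLineOK])
  | cons c0 t =>
    by_cases hc : c0 = '*'
    · subst hc
      simp [pvHoriz, pvHintOk, PySem.List.pyGet?, PySem.List.pyIdx?]
    · have hdig : t ≠ [] := by
        simp only [pvLineOK, Bool.or_eq_true, beq_iff_eq, Bool.and_eq_true,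
          Bool.not_eq_true', List.isEmpty_eq_false_iff] at h
        rcases h with h | ⟨_, ht⟩
        · exact absurd h hc
        · exact ht
      cases t with
      | nil => exact absurd rfl hdig
      | cons h1 t' =>
        -- evaluate A's helper
        have hge : (0 : Int) ≤ (t'.length : Int) + 1 := by omega
        have hg0 : PySem.List.pyGet? (c0 :: h1 :: t') 0 = some c0 := by
          simp [PySem.List.pyGet?, PySem.List.pyIdx?, hge]
        have hg1 : PySem.List.pyGet? (c0 :: h1 :: t') 1 = some h1 := by
          simp [PySem.List.pyGet?, PySem.List.pyIdx?]
        have hno : ¬ ((t'.length : Int) + 1 < 0) := by omega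
        -- the loop bound of A is the length of (c0::h1::t').dropLast
        have hb : ((PySem.List.slice (c0 :: h1 :: t') (some 1) (some (-1))).length : Int) + 1
            = PySem.List.len ((c0 :: h1 :: t').dropLast) := by
          simp [PySem.List.length_slice, PySem.List.clampIdx, PySem.List.len, hno]
        -- A's indexed loop body may read from dropLast: indices stay below length-1
        have hcongr : ∀ (s : Int × Char), ∀ i ∈ PySem.List.pyRange 2 (PySem.List.len ((c0 :: h1 :: t').dropLast)),
            (if PySem.List.pyGetD (c0 :: h1 :: t') i ' ' > s.2
              then (s.1 + 1, PySem.List.pyGetD (c0 :: h1 :: t') i ' ') else s)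
            = (if PySem.List.pyGetD ((c0 :: h1 :: t').dropLast) i ' ' > s.2
              then (s.1 + 1, PySem.List.pyGetD ((c0 :: h1 :: t').dropLast) i ' ') else s) := by
          intro s i hi
          rw [PySem.List.mem_pyRange_one] at hi
          have hlen : ((c0 :: h1 :: t').dropLast).length = t'.length + 1 := by
            simp [List.length_dropLast]
          have h0 : (0 : Int) ≤ i := by omega
          have h1' : i < (((c0 :: h1 :: t').dropLast).length : Int) := by
            rw [hlen]; simp only [PySem.List.len, hlen] at hi; exact_mod_cast hi.2
          have h2' : i < (((c0 :: h1 :: t')).length : Int) := by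
            simp only [List.length_cons]
            simp only [PySem.List.len, hlen] at hi
            omega
          rw [PySem.List.pyGetD_eq_getElem _ ' ' h0 h2',
              PySem.List.pyGetD_eq_getElem _ ' ' h0 h1', List.getElem_dropLast]
        -- both slices are t'.take (t'.length - 1)
        have hsliceB : PySem.List.slice (c0 :: h1 :: t') (some 2) (some (-1))
            = t'.take (t'.length - 1) := by
          simp [PySem.List.slice, PySem.List.clampIdx, hno]
        have hdropA : ((c0 :: h1 :: t').dropLast).drop 2 = t'.take (t'.length - 1) := by
          cases t' with
          | nil => rfl
          | cons a u => simp [List.dropLast_eq_take]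
        simp only [pvHoriz, hg0, hg1]
        rw [if_pos hc]
        simp only [pvHintOk, if_neg hc]
        rw [hb]
        rw [PySem.List.foldl_congr_mem _ _ _ _ hcongr]
        rw [PySem.List.foldl_pyRange_pyGetD ((c0 :: h1 :: t').dropLast) ' '
          (fun (s : Int × Char) c => if c > s.2 then (s.1 + 1, c) else s) ((1 : Int), h1)
          (by norm_num)]
        rw [show ((2 : Int).toNat) = 2 from rfl, hdropA]
        rw [pv_run_eq_brute h1 (t'.take (t'.length - 1))]
        rw [hsliceB]
        exact decide_eq_decide.mpr eq_comm

-- ===== VERDICT (by name: the statement is the Claim_ definition above) =====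
set_option maxHeartbeats 1000000 in
theorem check_horizontal_visibility_spec : Claim_equal_check_horizontal_visibility := by
  intro board _hDom hPre
  have hL : board.all (fun x => (pvHoriz x.toList).getD true)
      = board.all (fun row => pvHintOk row.toList) :=
    pv_all_congr_mem _ _ _ (fun row hrow => pv_horiz_getD _ (hPre row hrow).1)
  have hR : board.all (fun x => (pvHoriz ((PySem.Str.slice? x none none (-1)).getD "").toList).getD true)
      = board.all (fun row => pvHintOk ((PySem.Str.slice? row none none (-1)).getD "").toList) := by
    apply pv_all_congr_mem
    intro row hrow
    rw [PySem.Str.slice?_none_none_neg_one]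
    simp only [Option.getD_some, String.toList_ofList]
    exact pv_horiz_getD _ (hPre row hrow).2
  unfold Spec_check_horizontal_visibility
  simp only [check_horizontal_visibility_alt]
  rw [pv_all_and, ← hL, ← hR]
  simp only [check_horizontal_visibility]
  rw [pv_tf_filterMap, List.nil_append, List.filterMap_append, List.filterMap_map,
    List.all_append, pv_all_filterMap, pv_all_filterMap]
  simp only [Function.comp_apply]
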